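-- pv_equiv track=rewrite | github.com/yulexu/Robot | src/rfid/scripts/rfid_utils/basic.py | CV_preprocess
-- ===== SOURCE A (Python) =====
-- def CV_preprocess(data_seq,time_seq):
--     # simple preprocess, needs improve
--     window_size = 10 # pnts
--     threshold = 1 # meter
--     delete_idx = []
--     for idx in range(len(data_seq)-window_size):
--         if abs(data_seq[idx]-data_seq[idx + window_size]) > threshold:
--             delete_idx.append(idx + window_size)
--             #data_seq[idx + window_size] = data_seq[idx]
--     length = len(data_seq) - window_size
--     data_seq_out = [data_seq[i] for i in range(length) if i not in delete_idx]
--     time_seq_out = [time_seq[i] for i in range(length) if i not in delete_idx]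
--     return data_seq_out * 1, time_seq_out * 1
-- ===== SOURCE B (Python) =====
-- def CV_preprocess(data_seq, time_seq):
--     # Single fused pass: output index i is dropped exactly when i >= window_size
--     # and the backward-window difference exceeds the threshold; no delete_idx list.
--     window_size = 10
--     threshold = 1
--     data_seq_out = []
--     time_seq_out = []
--     for i in range(len(data_seq) - window_size):
--         if i >= window_size and abs(data_seq[i - window_size] - data_seq[i]) > threshold:
--             continue
--         data_seq_out.append(data_seq[i])
--         time_seq_out.append(time_seq[i])
--     return data_seq_out, time_seq_out
-- ===== Notes on version B (the rewrite author's own statement) =====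
-- stated objective: simpler
-- what changed: Replaces A's two-pass build-delete-index-list-then-filter-by-membership structure with one fused pass that appends to both output lists unless the backward-window difference at the current index exceeds the threshold, eliminating delete_idx and its O(n) membership scans.
import Mathlib
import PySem

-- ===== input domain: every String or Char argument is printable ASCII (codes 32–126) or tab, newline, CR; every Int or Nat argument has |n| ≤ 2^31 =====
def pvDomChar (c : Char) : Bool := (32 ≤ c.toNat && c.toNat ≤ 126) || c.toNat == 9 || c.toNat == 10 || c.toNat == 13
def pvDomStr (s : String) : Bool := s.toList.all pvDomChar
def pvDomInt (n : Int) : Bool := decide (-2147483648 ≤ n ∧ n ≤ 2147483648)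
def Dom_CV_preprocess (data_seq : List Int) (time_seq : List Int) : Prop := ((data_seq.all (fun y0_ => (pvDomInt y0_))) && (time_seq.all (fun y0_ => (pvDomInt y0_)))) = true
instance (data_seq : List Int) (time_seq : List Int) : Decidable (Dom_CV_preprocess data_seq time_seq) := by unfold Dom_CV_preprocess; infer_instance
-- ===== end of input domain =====

-- B fuses A's build-delete-index-then-filter two passes into one pass with no delete_idx list (simpler; return value only — A's `* 1` copies are value-identical).

-- ===== PORT A =====
-- transliteration of A: build delete_idx, then two comprehension filters over range(length)
def CV_preprocess (data_seq : List Int) (time_seq : List Int) : List Int × List Int :=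
  let window_size : Int := 10
  let threshold : Int := 1
  let delete_idx : List Int :=
    (PySem.List.pyRange 0 ((data_seq.length : Int) - window_size) 1).foldl
      (fun acc idx =>
        if |PySem.List.pyGetD data_seq idx 0 - PySem.List.pyGetD data_seq (idx + window_size) 0| > threshold
        then acc ++ [idx + window_size] else acc) []
  let length : Int := (data_seq.length : Int) - window_size
  let data_seq_out : List Int :=
    ((PySem.List.pyRange 0 length 1).filter (fun i => !(delete_idx.contains i))).map
      (fun i => PySem.List.pyGetD data_seq i 0)
  let time_seq_out : List Int :=
    ((PySem.List.pyRange 0 length 1).filter (fun i => !(delete_idx.contains i))).map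
      (fun i => PySem.List.pyGetD time_seq i 0)
  (data_seq_out, time_seq_out)

-- ===== PORT B =====
-- transliteration of B: one fused pass, skip when backward-window difference exceeds threshold
def CV_preprocess_alt (data_seq : List Int) (time_seq : List Int) : List Int × List Int :=
  (PySem.List.pyRange 0 ((data_seq.length : Int) - 10) 1).foldl
    (fun acc i =>
      if 10 ≤ i ∧ |PySem.List.pyGetD data_seq (i - 10) 0 - PySem.List.pyGetD data_seq i 0| > 1
      then acc
      else (acc.1 ++ [PySem.List.pyGetD data_seq i 0], acc.2 ++ [PySem.List.pyGetD time_seq i 0]))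
    ([], [])

-- ===== PRECONDITION & SPEC =====
-- Pre_ excludes exactly the inputs where A raises IndexError: time_seq shorter than len(data_seq)-10.
def Pre_CV_preprocess (data_seq : List Int) (time_seq : List Int) : Prop :=
  (data_seq.length : Int) - 10 ≤ (time_seq.length : Int)
instance (data_seq : List Int) (time_seq : List Int) : Decidable (Pre_CV_preprocess data_seq time_seq) := by unfold Pre_CV_preprocess; infer_instance
def pvWitness_CV_preprocess : List Int × List Int := ([0,0,0,0,0,0,0,0,0,0,5,0], [1,2])

def Spec_CV_preprocess (data_seq : List Int) (time_seq : List Int) (out : List Int × List Int) : Prop := out = CV_preprocess_alt data_seq time_seq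
instance (data_seq : List Int) (time_seq : List Int) (out : List Int × List Int) : Decidable (Spec_CV_preprocess data_seq time_seq out) := by unfold Spec_CV_preprocess; infer_instance

-- ===== CLAIM (what is proved, stated in full; the proofs are below) =====
def Claim_equal_CV_preprocess : Prop := ∀ (data_seq : List Int) (time_seq : List Int), Dom_CV_preprocess data_seq time_seq → Pre_CV_preprocess data_seq time_seq → Spec_CV_preprocess data_seq time_seq (CV_preprocess data_seq time_seq)

-- ===== LEMMAS AND PROOFS =====

-- B's pair-accumulating fold splits into two filter-maps
theorem pair_foldl_split (L : List Int) (q : Int → Prop) [DecidablePred q]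
    (f g : Int → Int) (a1 a2 : List Int) :
    L.foldl (fun acc i => if q i then acc else (acc.1 ++ [f i], acc.2 ++ [g i])) (a1, a2)
      = (a1 ++ (L.filter (fun i => !decide (q i))).map f,
         a2 ++ (L.filter (fun i => !decide (q i))).map g) := by
  induction L generalizing a1 a2 with
  | nil => simp
  | cons x xs ih =>
    by_cases hx : q x <;> simp [hx, ih, List.append_assoc]

theorem delete_mem (data_seq : List Int) (i : Int)
    (hi0 : 0 ≤ i) (hin : i < (data_seq.length : Int) - 10) :
    (((PySem.List.pyRange 0 ((data_seq.length : Int) - 10) 1).filter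
        (fun idx => decide (|PySem.List.pyGetD data_seq idx 0 - PySem.List.pyGetD data_seq (idx + 10) 0| > 1))).map
        (fun idx => idx + 10)).contains i
      = decide (10 ≤ i ∧ |PySem.List.pyGetD data_seq (i - 10) 0 - PySem.List.pyGetD data_seq i 0| > 1) := by
  simp only [List.contains_eq_mem, List.mem_map, List.mem_filter,
    PySem.List.mem_pyRange_one, decide_eq_decide, decide_eq_true_eq]
  constructor
  · rintro ⟨j, ⟨⟨hj0, hjn⟩, hc⟩, rfl⟩
    refine ⟨by omega, ?_⟩
    have : j + 10 - 10 = j := by omega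
    rwa [this]
  · rintro ⟨h10, hc⟩
    refine ⟨i - 10, ⟨⟨by omega, by omega⟩, ?_⟩, by omega⟩
    have : i - 10 + 10 = i := by omega
    rwa [this]

-- ===== VERDICT (by name: the statement is the Claim_ definition above) =====
theorem CV_preprocess_spec : Claim_equal_CV_preprocess := by
  intro data_seq time_seq _ _
  unfold Spec_CV_preprocess CV_preprocess CV_preprocess_alt
  rw [pair_foldl_split]
  simp only [List.nil_append]
  rw [PySem.List.foldl_append_ite
    (p := fun idx => |PySem.List.pyGetD data_seq idx 0 - PySem.List.pyGetD data_seq (idx + 10) 0| > 1)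
    (f := fun idx => idx + 10)]
  simp only [List.nil_append]
  congr 1 <;>
  · congr 1
    apply List.filter_congr
    intro i hi
    rw [PySem.List.mem_pyRange_one] at hi
    rw [delete_mem data_seq i hi.1 hi.2]
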